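-- pv_equiv track=rewrite | github.com/odevauchelle/pyFreeFem | pyFreeFem/meshTools/segments.py | ordered_edges_to_segments
-- ===== SOURCE A (Python) =====
-- def ordered_edges_to_segments( edges ) :
--
--     segments = []
--     segment = edges[0]
--     previous_edge = edges[0]
--
--     for edge in edges[1:] :
--
--         if edge[0] == previous_edge[1] :
--             segment += [ edge[1] ]
--
--         elif len(segment) > 0 :
--             segments += [ segment ]
--             segment = edge
--
--         previous_edge = edge
--
--     if len(segment) > 0 :
--         segments += [ segment ]
--
--     return segments
-- ===== SOURCE B (Python) =====
-- def ordered_edges_to_segments( edges ) :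
--     # Different decomposition: consume one maximal chained run per outer step
--     # (nested loops over an explicit suffix) instead of A's single flag/elif pass.
--     # Like A, this mutates the segment-start edge objects of `edges` in place.
--     segments = []
--     segment = edges[0]
--     prev = edges[0]
--     rest = edges[1:]
--     while True :
--         while rest and rest[0][0] == prev[1] :
--             prev = rest[0]
--             segment += [ prev[1] ]
--             rest = rest[1:]
--         segments += [ segment ]
--         if not rest :
--             return segments
--         segment = rest[0]
--         prev = rest[0]
--         rest = rest[1:]
-- ===== Notes on version B (the rewrite author's own statement) =====
-- stated objective: alternative
-- what changed: Replaces A's single pass with a previous-edge flag and elif guard by nested loops over an explicit suffix: the inner loop consumes one maximal chained run into the current segment, the outer loop emits one segment per run.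
-- outside the precondition, e.g. on ordered_edges_to_segments([[]]): A returns [], B returns [[]]; on ordered_edges_to_segments([]): A raises IndexError, B raises IndexError
import Mathlib
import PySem

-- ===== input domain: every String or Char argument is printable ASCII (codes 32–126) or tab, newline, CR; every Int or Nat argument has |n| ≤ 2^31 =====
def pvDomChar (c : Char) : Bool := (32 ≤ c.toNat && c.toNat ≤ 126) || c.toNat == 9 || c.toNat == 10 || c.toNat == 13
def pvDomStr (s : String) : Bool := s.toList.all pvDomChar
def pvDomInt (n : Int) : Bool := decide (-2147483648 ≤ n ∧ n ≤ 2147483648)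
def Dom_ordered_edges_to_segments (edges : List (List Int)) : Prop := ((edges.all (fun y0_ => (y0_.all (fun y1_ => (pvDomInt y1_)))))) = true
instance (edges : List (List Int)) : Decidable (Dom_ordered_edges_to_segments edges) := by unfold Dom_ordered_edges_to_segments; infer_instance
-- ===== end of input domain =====

-- B replaces A's single flag/elif pass by nested loops that consume one maximal
-- chained run per outer step (objective: alternative decomposition; equivalence is
-- about the return value — both A and B mutate the segment-start edges in place).

-- ===== PORT A =====
-- loop body of A's for-loop (state = (segments, segment, previous_edge))
def pvStepA (st : List (List Int) × List Int × List Int) (edge : List Int) :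
    List (List Int) × List Int × List Int :=
  if PySem.List.pyGetD edge 0 0 = PySem.List.pyGetD st.2.2 1 0 then
    (st.1, st.2.1 ++ [PySem.List.pyGetD edge 1 0], edge)
  else if 0 < st.2.1.length then
    (st.1 ++ [st.2.1], edge, edge)
  else
    (st.1, st.2.1, edge)

def ordered_edges_to_segments (edges : List (List Int)) : List (List Int) :=
  let segment0 := PySem.List.pyGetD edges 0 []
  let st := (PySem.List.slice edges (some 1) none).foldl pvStepA ([], segment0, segment0)
  if 0 < st.2.1.length then st.1 ++ [st.2.1] else st.1

-- ===== PORT B =====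
-- inner while loop of Source B: extend `segment` with the chained run at the head of
-- `rest`, returning the final segment and the remaining suffix
def pvInner (segment prev : List Int) (rest : List (List Int)) :
    List Int × List (List Int) :=
  match rest with
  | [] => (segment, [])
  | e :: r =>
    if PySem.List.pyGetD e 0 0 = PySem.List.pyGetD prev 1 0 then
      pvInner (segment ++ [PySem.List.pyGetD e 1 0]) e r
    else (segment, e :: r)

-- needed by pvOuter's decreasing_by
theorem pvInner_length_le (segment prev : List Int) (rest : List (List Int)) :
    (pvInner segment prev rest).2.length ≤ rest.length := by
  induction rest generalizing segment prev with
  | nil => simp [pvInner]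
  | cons e r ih =>
    simp only [pvInner]
    split
    · exact le_trans (ih _ _) (by simp)
    · simp

-- outer while-True loop of Source B
def pvOuter (segments : List (List Int)) (segment prev : List Int)
    (rest : List (List Int)) : List (List Int) :=
  match h : pvInner segment prev rest with
  | (seg, []) => segments ++ [seg]
  | (seg, e :: r') => pvOuter (segments ++ [seg]) e e r'
termination_by rest.length
decreasing_by
  have hle := pvInner_length_le segment prev rest
  rw [h] at hle
  simp at hle
  omega

def ordered_edges_to_segments_alt (edges : List (List Int)) : List (List Int) :=
  let segment0 := PySem.List.pyGetD edges 0 []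
  pvOuter [] segment0 segment0 (PySem.List.slice edges (some 1) none)

-- ===== PRECONDITION & SPEC =====
-- Pre_ admits exactly the inputs on which the Python A returns, except the single
-- malformed input [[]] (one edge with no endpoints), where A's value [] is an
-- artefact of its len(segment)>0 guard; everywhere else A raises IndexError
-- outside Pre_ (empty list, or an endpoint index into a too-short edge).
def Pre_ordered_edges_to_segments (edges : List (List Int)) : Prop :=
  edges ≠ [] ∧
  (∀ e ∈ edges.dropLast, 2 ≤ e.length) ∧
  1 ≤ ((edges.getLast?).getD []).length ∧
  (2 ≤ edges.length →
     PySem.List.pyGetD ((edges.getLast?).getD []) 0 0 =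
       PySem.List.pyGetD ((edges.dropLast.getLast?).getD []) 1 0 →
     2 ≤ ((edges.getLast?).getD []).length)

instance (edges : List (List Int)) : Decidable (Pre_ordered_edges_to_segments edges) := by
  unfold Pre_ordered_edges_to_segments; infer_instance

def pvWitness_ordered_edges_to_segments : List (List Int) := [[0, 1], [1, 2], [5, 6]]

def Spec_ordered_edges_to_segments (edges : List (List Int)) (out : List (List Int)) : Prop := out = ordered_edges_to_segments_alt edges
instance (edges : List (List Int)) (out : List (List Int)) : Decidable (Spec_ordered_edges_to_segments edges out) := by unfold Spec_ordered_edges_to_segments; infer_instance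

-- ===== CLAIM (what is proved, stated in full; the proofs are below) =====
def Claim_equal_ordered_edges_to_segments : Prop := ∀ (edges : List (List Int)), Dom_ordered_edges_to_segments edges → Pre_ordered_edges_to_segments edges → Spec_ordered_edges_to_segments edges (ordered_edges_to_segments edges)

-- ===== LEMMAS AND PROOFS =====

-- one unfolding of pvOuter
theorem pvOuter_eq (segments : List (List Int)) (segment prev : List Int)
    (rest : List (List Int)) :
    pvOuter segments segment prev rest =
      match pvInner segment prev rest with
      | (seg, []) => segments ++ [seg]
      | (seg, e :: r') => pvOuter (segments ++ [seg]) e e r' := by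
  rw [pvOuter]
  rcases hp : pvInner segment prev rest with ⟨seg, rest'⟩
  cases rest' <;> simp

-- A's fold with a nonempty current segment and nonempty remaining edges computes
-- exactly B's run-consuming loop
theorem pvFold_eq_pvOuter (rest : List (List Int)) :
    ∀ (segs : List (List Int)) (seg prev : List Int),
      0 < seg.length → (∀ e ∈ rest, 0 < e.length) →
      (if 0 < (rest.foldl pvStepA (segs, seg, prev)).2.1.length then
         (rest.foldl pvStepA (segs, seg, prev)).1 ++ [(rest.foldl pvStepA (segs, seg, prev)).2.1]
       else (rest.foldl pvStepA (segs, seg, prev)).1) =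
        pvOuter segs seg prev rest := by
  induction rest with
  | nil =>
    intro segs seg prev hseg _
    simp only [List.foldl_nil, pvOuter_eq, pvInner]
    simp [hseg]
  | cons e r ih =>
    intro segs seg prev hseg hr
    have he : 0 < e.length := hr e (List.mem_cons_self ..)
    have hr' : ∀ x ∈ r, 0 < x.length := fun x hx => hr x (List.mem_cons_of_mem _ hx)
    simp only [List.foldl_cons]
    by_cases hc : PySem.List.pyGetD e 0 0 = PySem.List.pyGetD prev 1 0
    · have hstep : pvStepA (segs, seg, prev) e =
          (segs, seg ++ [PySem.List.pyGetD e 1 0], e) := by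
        simp [pvStepA, hc]
      rw [hstep, ih segs _ e (by simp) hr']
      rw [pvOuter_eq segs seg prev (e :: r), pvOuter_eq segs _ e r]
      simp [pvInner, hc]
    · have hstep : pvStepA (segs, seg, prev) e = (segs ++ [seg], e, e) := by
        simp [pvStepA, hc, hseg]
      rw [hstep, ih (segs ++ [seg]) e e he hr']
      rw [pvOuter_eq segs seg prev (e :: r)]
      simp only [pvInner, if_neg hc]

-- every edge admitted by Pre_ is nonempty
theorem pre_all_pos (edges : List (List Int))
    (h : Pre_ordered_edges_to_segments edges) : ∀ e ∈ edges, 0 < e.length := by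
  obtain ⟨hne, hdrop, hlast, -⟩ := h
  intro e he
  have hsplit := List.dropLast_concat_getLast hne
  rw [← hsplit] at he
  rcases List.mem_append.1 he with hmem | hmem
  · have := hdrop e hmem; omega
  · have heq : e = edges.getLast hne := by simpa using hmem
    rw [show edges.getLast? = some (edges.getLast hne) from
          List.getLast?_eq_some_getLast hne, Option.getD_some] at hlast
    rw [heq]; omega

-- ===== VERDICT (by name: the statement is the Claim_ definition above) =====
theorem ordered_edges_to_segments_spec : Claim_equal_ordered_edges_to_segments := by
  intro edges _ hpre
  unfold Spec_ordered_edges_to_segments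
  have hall := pre_all_pos edges hpre
  obtain ⟨hne, -⟩ := hpre
  obtain ⟨e0, rest, rfl⟩ := List.exists_cons_of_ne_nil hne
  unfold ordered_edges_to_segments ordered_edges_to_segments_alt
  rw [PySem.List.slice_from_one]
  have h0 : PySem.List.pyGetD (e0 :: rest) 0 [] = e0 := PySem.List.pyGetD_zero_cons ..
  rw [h0]
  simp only [List.tail_cons]
  exact (pvFold_eq_pvOuter rest [] e0 e0
    (hall e0 (List.mem_cons_self ..))
    (fun e he => hall e (List.mem_cons_of_mem _ he)))
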